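-- pv_equiv track=rewrite | github.com/recelos/zto-lab | lab7/zad3.py | calculate_objectives
-- ===== SOURCE A (Python) =====
-- def calculate_objectives(solution, processing_times, due_dates) -> tuple[int, int, int]:
--     num_machines = len(processing_times)
--     num_jobs = len(solution)
--     completion_times = [[0] * num_jobs for _ in range(num_machines)]
--     total_flowtime = 0
--     max_tardiness = 0
--     max_lateness = 0
--     total_lateness = 0
--
--     for i in range(num_machines):
--         for j in range(num_jobs):
--             job = solution[j]
--             if i == 0 and j == 0:
--                 completion_times[i][j] = processing_times[i][job]
--             elif i == 0:
--                 completion_times[i][j] = completion_times[i][j-1] + processing_times[i][job]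
--             elif j == 0:
--                 completion_times[i][j] = completion_times[i-1][j] + processing_times[i][job]
--             else:
--                 completion_times[i][j] = max(completion_times[i-1][j], completion_times[i][j-1]) + processing_times[i][job]
--
--     for j in range(num_jobs):
--         job = solution[j]
--         total_flowtime += completion_times[-1][j]
--         lateness = completion_times[-1][j] - due_dates[j]
--         tardiness = max(0, lateness)
--         max_tardiness = max(max_tardiness, tardiness)
--         max_lateness = max(max_lateness, lateness)
--         total_lateness += lateness
--     return total_flowtime, max_tardiness, max_lateness, total_lateness
-- ===== SOURCE B (Python) =====
-- def calculate_objectives(solution, processing_times, due_dates) -> tuple[int, int, int]: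
--     # One pass over jobs keeping a single per-machine completion column instead of the full table.
--     c = [0] * len(processing_times)
--     total_flowtime = 0
--     max_tardiness = 0
--     max_lateness = 0
--     total_lateness = 0
--     for j, job in enumerate(solution):
--         new_c = []
--         prev = None
--         for done, row in zip(c, processing_times):
--             t = row[job]
--             if prev is None:
--                 cur = done + t          # first machine: wait only for the previous job
--             elif j == 0:
--                 cur = prev + t          # first job: no predecessor on this machine
--             else:
--                 cur = max(done, prev) + t
--             new_c.append(cur)
--             prev = cur
--         c = new_c
--         completion = c[-1]
--         total_flowtime += completion
--         lateness = completion - due_dates[j]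
--         max_tardiness = max(max_tardiness, max(0, lateness))
--         max_lateness = max(max_lateness, lateness)
--         total_lateness += lateness
--     return total_flowtime, max_tardiness, max_lateness, total_lateness
-- ===== Notes on version B (the rewrite author's own statement) =====
-- stated objective: simpler
-- what changed: Replaces the machines-major 2D completion-time table plus a separate second objective pass by a single job-major pass that keeps only a 1D per-machine completion column and accumulates all four objectives in the same loop.
import Mathlib
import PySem

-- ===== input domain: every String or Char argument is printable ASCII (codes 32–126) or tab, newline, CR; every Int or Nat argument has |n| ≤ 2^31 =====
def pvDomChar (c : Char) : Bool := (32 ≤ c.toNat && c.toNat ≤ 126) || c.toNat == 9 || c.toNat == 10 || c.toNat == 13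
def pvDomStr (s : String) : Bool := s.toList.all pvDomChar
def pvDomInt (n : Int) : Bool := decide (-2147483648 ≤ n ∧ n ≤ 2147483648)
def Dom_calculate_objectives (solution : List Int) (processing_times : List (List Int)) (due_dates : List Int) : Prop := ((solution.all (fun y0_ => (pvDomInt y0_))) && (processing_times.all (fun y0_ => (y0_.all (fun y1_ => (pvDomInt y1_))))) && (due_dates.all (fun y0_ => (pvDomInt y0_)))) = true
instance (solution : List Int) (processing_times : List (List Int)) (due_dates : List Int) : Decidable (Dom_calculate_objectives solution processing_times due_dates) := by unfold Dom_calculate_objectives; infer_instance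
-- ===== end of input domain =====

-- B keeps a single per-machine completion column and accumulates all four objectives in one
-- job-major pass, instead of A's machine-major 2D table plus a second objective pass (same results).


-- ===== PORT A =====
-- inner body of A's nested table-filling loop (state: the whole 2D table)
def pvAinner (solution : List Int) (processing_times : List (List Int)) (i : Int)
    (ct : List (List Int)) (j : Int) : List (List Int) :=
  let job := PySem.List.pyGetD solution j 0
  let v : Int :=
    if i = 0 ∧ j = 0 then
      PySem.List.pyGetD (PySem.List.pyGetD processing_times i []) job 0
    else if i = 0 then
      PySem.List.pyGetD (PySem.List.pyGetD ct i []) (j - 1) 0 +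
        PySem.List.pyGetD (PySem.List.pyGetD processing_times i []) job 0
    else if j = 0 then
      PySem.List.pyGetD (PySem.List.pyGetD ct (i - 1) []) j 0 +
        PySem.List.pyGetD (PySem.List.pyGetD processing_times i []) job 0
    else
      max (PySem.List.pyGetD (PySem.List.pyGetD ct (i - 1) []) j 0)
          (PySem.List.pyGetD (PySem.List.pyGetD ct i []) (j - 1) 0) +
        PySem.List.pyGetD (PySem.List.pyGetD processing_times i []) job 0
  PySem.List.pySetD ct i (PySem.List.pySetD (PySem.List.pyGetD ct i []) j v)

-- A's filled completion-time table
def pvAtable (solution : List Int) (processing_times : List (List Int)) : List (List Int) :=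
  (PySem.List.pyRange 0 (processing_times.length : Int) 1).foldl
    (fun ct i =>
      (PySem.List.pyRange 0 (solution.length : Int) 1).foldl
        (fun ct j => pvAinner solution processing_times i ct j) ct)
    (List.replicate processing_times.length (List.replicate solution.length (0 : Int)))

-- body of A's second (objective-accumulating) loop
def pvAacc (due_dates : List Int) (tbl : List (List Int))
    (st : Int × Int × Int × Int) (j : Int) : Int × Int × Int × Int :=
  let cj := PySem.List.pyGetD (PySem.List.pyGetD tbl (-1) []) j 0
  let lateness := cj - PySem.List.pyGetD due_dates j 0
  let tardiness := max 0 lateness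
  (st.1 + cj, max st.2.1 tardiness, max st.2.2.1 lateness, st.2.2.2 + lateness)

def calculate_objectives (solution : List Int) (processing_times : List (List Int)) (due_dates : List Int) : Int × Int × Int × Int :=
  let tbl := pvAtable solution processing_times
  (PySem.List.pyRange 0 (solution.length : Int) 1).foldl
    (fun st j => pvAacc due_dates tbl st j) (0, 0, 0, 0)

-- ===== PORT B =====
-- B's inner machine scan: update the 1D completion column for one job
def pvBscan (processing_times : List (List Int)) (job : Int) (j : Int) (c : List Int) : List Int :=
  ((c.zip processing_times).foldl
    (fun (s : List Int × Option Int) dr =>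
      let t := PySem.List.pyGetD dr.2 job 0
      let cur := match s.2 with
        | none => dr.1 + t
        | some p => if j = 0 then p + t else max dr.1 p + t
      (s.1 ++ [cur], some cur))
    ([], none)).1

-- body of B's single job loop (state: column and the four accumulators)
def pvBstep (processing_times : List (List Int)) (due_dates : List Int)
    (st : List Int × Int × Int × Int × Int) (jj : Int × Int) : List Int × Int × Int × Int × Int :=
  let c' := pvBscan processing_times jj.2 jj.1 st.1
  let completion := PySem.List.pyGetD c' (-1) 0
  let lateness := completion - PySem.List.pyGetD due_dates jj.1 0
  (c', st.2.1 + completion, max st.2.2.1 (max 0 lateness), max st.2.2.2.1 lateness,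
    st.2.2.2.2 + lateness)

def calculate_objectives_alt (solution : List Int) (processing_times : List (List Int)) (due_dates : List Int) : Int × Int × Int × Int :=
  ((PySem.List.enumerate solution 0).foldl
    (fun st jj => pvBstep processing_times due_dates st jj)
    (List.replicate processing_times.length (0 : Int), 0, 0, 0, 0)).2

-- ===== PRECONDITION & SPEC =====
-- Pre_ excludes exactly the inputs where the Python raises IndexError: a nonempty solution with no
-- machines (completion_times[-1] / c[-1] on an empty list), a due-date list shorter than the
-- solution, or a job id in solution that is out of range (in Python's negative-index sense) for
-- some machine's row.
def Pre_calculate_objectives (solution : List Int) (processing_times : List (List Int)) (due_dates : List Int) : Prop :=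
  (solution = [] ∨ processing_times ≠ []) ∧
  solution.length ≤ due_dates.length ∧
  ∀ x ∈ solution, ∀ row ∈ processing_times, PySem.Raise.InRange row.length x

instance (solution : List Int) (processing_times : List (List Int)) (due_dates : List Int) : Decidable (Pre_calculate_objectives solution processing_times due_dates) := by unfold Pre_calculate_objectives; infer_instance

def pvWitness_calculate_objectives : List Int × List (List Int) × List Int :=
  ([1, 0], [[2, 3], [4, 1]], [3, 9])

def Spec_calculate_objectives (solution : List Int) (processing_times : List (List Int)) (due_dates : List Int) (out : Int × Int × Int × Int) : Prop := out = calculate_objectives_alt solution processing_times due_dates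
instance (solution : List Int) (processing_times : List (List Int)) (due_dates : List Int) (out : Int × Int × Int × Int) : Decidable (Spec_calculate_objectives solution processing_times due_dates out) := by unfold Spec_calculate_objectives; infer_instance

-- ===== CLAIM (what is proved, stated in full; the proofs are below) =====
def Claim_equal_calculate_objectives : Prop := ∀ (solution : List Int) (processing_times : List (List Int)) (due_dates : List Int), Dom_calculate_objectives solution processing_times due_dates → Pre_calculate_objectives solution processing_times due_dates → Spec_calculate_objectives solution processing_times due_dates (calculate_objectives solution processing_times due_dates)

-- ===== LEMMAS AND PROOFS =====

-- the processing time of the job in slot j on machine i (total form, as both ports read it)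
def pvT (processing_times : List (List Int)) (solution : List Int) (i j : Nat) : Int :=
  PySem.List.pyGetD (processing_times.getD i []) (solution.getD j 0) 0

-- the flowshop completion-time recurrence both programs compute
def pvCT (pt : List (List Int)) (sol : List Int) : Nat → Nat → Int
  | 0, 0 => pvT pt sol 0 0
  | 0, j + 1 => pvCT pt sol 0 j + pvT pt sol 0 (j + 1)
  | i + 1, 0 => pvCT pt sol i 0 + pvT pt sol (i + 1) 0
  | i + 1, j + 1 =>
      max (pvCT pt sol i (j + 1)) (pvCT pt sol (i + 1) j) + pvT pt sol (i + 1) (j + 1)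
  termination_by i j => (i, j)

theorem pyRange_nat (n : Nat) :
    PySem.List.pyRange 0 (n:Int) 1 = (List.range n).map (fun k : Nat => (k:Int)) := by
  have h : ((n:Int) - 0).toNat = n := by omega
  rw [PySem.List.pyRange_one, h]
  exact List.map_congr_left (fun k _ => by omega)

theorem getD_prefix (f : Nat → Int) (l n k : Nat) (hk : k < l) :
    ((List.range l).map f ++ List.replicate (n - l) (0:Int)).getD k 0 = f k := by
  rw [List.getD_append _ _ _ _ (by simpa using hk)]
  exact PySem.List.getD_map_range f l k 0 hk

theorem set_prefix (f : Nat → Int) (l n : Nat) (hl : l < n) :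
    (((List.range l).map f ++ List.replicate (n - l) (0:Int)).set l (f l))
      = (List.range (l + 1)).map f ++ List.replicate (n - (l + 1)) 0 := by
  rw [List.set_append]
  rw [if_neg (by simp)]
  rw [show List.replicate (n - l) (0:Int) = 0 :: List.replicate (n - l - 1) 0 from by
    rw [← List.replicate_succ]; congr 1; omega]
  simp only [List.length_map, List.length_range, Nat.sub_self, List.set_cons_zero]
  rw [List.range_succ, List.map_append, List.append_assoc, Nat.sub_sub]
  simp

theorem pv_ext {α : Type} (d : α) (xs ys : List α) (hlen : xs.length = ys.length)
    (h : ∀ k, k < xs.length → xs.getD k d = ys.getD k d) : xs = ys := by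
  apply List.ext_getElem hlen
  intro k h1 h2
  have := h k h1
  rwa [List.getD_eq_getElem _ _ h1, List.getD_eq_getElem _ _ h2] at this

theorem getD_mixed {α : Type} (d z : α) (f : Nat → α) (m k q : Nat) (hk : k ≤ m) (hq : q < m) :
    ((List.range k).map f ++ List.replicate (m - k) z).getD q d = if q < k then f q else z := by
  by_cases h : q < k
  · rw [if_pos h, List.getD_append _ _ _ _ (by simpa using h)]
    exact PySem.List.getD_map_range f k q d h
  · rw [if_neg h, List.getD_append_right _ _ _ _ (by simpa using Nat.le_of_not_lt h)]
    simp only [List.length_map, List.length_range]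
    rw [List.getD_replicate _ (by omega)]

theorem innerA (sol : List Int) (pt : List (List Int)) (i : Nat) (hi : i < pt.length)
    (T : List (List Int)) (hTlen : T.length = pt.length)
    (hprev : ∀ i', i' < i → T.getD i' [] = (List.range sol.length).map (fun j => pvCT pt sol i' j))
    (hcur : T.getD i [] = List.replicate sol.length 0) :
    ∀ l, l ≤ sol.length →
      ((List.range l).foldl (fun ct (j : Nat) => pvAinner sol pt (i:Int) ct (j:Int)) T).length = pt.length
      ∧ (∀ i', i' ≠ i →
          ((List.range l).foldl (fun ct (j : Nat) => pvAinner sol pt (i:Int) ct (j:Int)) T).getD i' []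
            = T.getD i' [])
      ∧ ((List.range l).foldl (fun ct (j : Nat) => pvAinner sol pt (i:Int) ct (j:Int)) T).getD i []
          = (List.range l).map (fun j => pvCT pt sol i j)
              ++ List.replicate (sol.length - l) 0 := by
  intro l
  induction l with
  | zero => intro _; refine ⟨hTlen, fun _ _ => rfl, by simpa using hcur⟩
  | succ l ihl =>
    intro hl1
    have hl : l ≤ sol.length := by omega
    have hln : l < sol.length := by omega
    obtain ⟨Ulen, Uunch, Urow⟩ := ihl hl
    set U := (List.range l).foldl (fun ct (j : Nat) => pvAinner sol pt (i:Int) ct (j:Int)) T with hU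
    rw [List.range_succ, List.foldl_append, List.foldl_cons, List.foldl_nil]
    have hv : pvAinner sol pt (i:Int) U (l:Int)
        = U.set i ((U.getD i []).set l (pvCT pt sol i l)) := by
      simp only [pvAinner, PySem.List.pyGetD_natCast, PySem.List.pySetD_natCast,
        Nat.cast_eq_zero]
      congr 2
      cases i with
      | zero =>
        cases l with
        | zero =>
          rw [if_pos ⟨rfl, rfl⟩]
          simp [pvCT, pvT]
        | succ l' =>
          rw [if_neg (by omega), if_pos rfl]
          rw [show ((l' + 1 : Nat) : Int) - 1 = (l' : Int) from by push_cast; ring]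
          rw [PySem.List.pyGetD_natCast, Urow, getD_prefix _ _ _ _ (by omega)]
          simp [pvCT, pvT]
      | succ i' =>
        cases l with
        | zero =>
          rw [if_neg (by omega), if_neg (by omega), if_pos rfl]
          rw [show ((i' + 1 : Nat) : Int) - 1 = (i' : Int) from by push_cast; ring]
          rw [PySem.List.pyGetD_natCast, Uunch i' (by omega), hprev i' (by omega),
            PySem.List.getD_map_range _ _ _ _ (by omega)]
          simp [pvCT, pvT]
        | succ l' =>
          rw [if_neg (by omega), if_neg (by omega), if_neg (by omega)]
          rw [show ((i' + 1 : Nat) : Int) - 1 = (i' : Int) from by push_cast; ring]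
          rw [show ((l' + 1 : Nat) : Int) - 1 = (l' : Int) from by push_cast; ring]
          rw [PySem.List.pyGetD_natCast, PySem.List.pyGetD_natCast,
            Uunch i' (by omega), hprev i' (by omega),
            PySem.List.getD_map_range _ _ _ _ (by omega),
            Urow, getD_prefix _ _ _ _ (by omega)]
          conv_rhs => rw [pvCT]
          simp [pvT]
    rw [hv]
    refine ⟨by simpa using Ulen, ?_, ?_⟩
    · intro i' hne
      rw [List.getD, List.getElem?_set_ne (by omega)]
      exact Uunch i' hne
    · rw [List.getD, List.getElem?_set_self (by omega)]
      simp only [Option.getD_some]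
      rw [Urow, set_prefix _ _ _ hln, List.range_succ]

theorem outerA (sol : List Int) (pt : List (List Int)) :
    ∀ k, k ≤ pt.length →
    (List.range k).foldl
      (fun T (i : Nat) => (List.range sol.length).foldl
        (fun ct (j : Nat) => pvAinner sol pt (i:Int) ct (j:Int)) T)
      (List.replicate pt.length (List.replicate sol.length 0))
    = (List.range k).map (fun i => (List.range sol.length).map (fun j => pvCT pt sol i j))
        ++ List.replicate (pt.length - k) (List.replicate sol.length 0) := by
  intro k
  induction k with
  | zero => intro _; simp
  | succ k ih =>
    intro hk1
    have hk : k ≤ pt.length := by omega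
    conv_lhs => rw [List.range_succ, List.foldl_append, List.foldl_cons, List.foldl_nil, ih hk]
    set Tk := (List.range k).map (fun i => (List.range sol.length).map (fun j => pvCT pt sol i j))
        ++ List.replicate (pt.length - k) (List.replicate sol.length (0:Int)) with hTk
    have hTlen : Tk.length = pt.length := by
      rw [hTk]; simp; omega
    have hprev : ∀ i', i' < k →
        Tk.getD i' [] = (List.range sol.length).map (fun j => pvCT pt sol i' j) := by
      intro i' hi'
      rw [hTk, getD_mixed _ _ _ _ _ _ hk (by omega), if_pos hi']
    have hcur : Tk.getD k [] = List.replicate sol.length 0 := by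
      rw [hTk, getD_mixed _ _ _ _ _ _ hk (by omega), if_neg (by omega)]
    obtain ⟨Ulen, Uunch, Urow⟩ :=
      innerA sol pt k (by omega) Tk hTlen hprev hcur sol.length (le_refl _)
    apply pv_ext ([] : List Int)
    · rw [Ulen]; simp; omega
    · intro q hq
      rw [Ulen] at hq
      by_cases hqk : q = k
      · subst hqk
        rw [Urow]
        simp only [Nat.sub_self, List.replicate_zero, List.append_nil]
        rw [getD_mixed _ _ _ _ _ _ (by omega) hq, if_pos (by omega)]
      · rw [Uunch q hqk, hTk, getD_mixed _ _ _ _ _ _ hk hq,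
          getD_mixed _ _ _ _ _ _ (by omega) hq]
        by_cases h2 : q < k
        · rw [if_pos h2, if_pos (by omega)]
        · rw [if_neg h2, if_neg (by omega)]

theorem tableA_eq (sol : List Int) (pt : List (List Int)) :
    pvAtable sol pt =
      (List.range pt.length).map (fun i => (List.range sol.length).map (fun j => pvCT pt sol i j)) := by
  have h := outerA sol pt pt.length (le_refl _)
  rw [pvAtable]
  simp only [pyRange_nat, List.foldl_map]
  simpa using h
theorem scanAux (pt : List (List Int)) (sol : List Int) (j : Nat) (job : Int)
    (hjob : job = sol.getD j 0) :
    ∀ (rows : List (List Int)) (i0 : Nat) (cs acc : List Int) (prev : Option Int),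
    rows = pt.drop i0 →
    cs.length = rows.length →
    (∀ k, (hk : k < cs.length) → cs[k] = (if j = 0 then 0 else pvCT pt sol (i0 + k) (j - 1))) →
    prev = (match i0 with | 0 => none | Nat.succ i' => some (pvCT pt sol i' j)) →
    ((cs.zip rows).foldl
       (fun (s : List Int × Option Int) dr =>
         let t := PySem.List.pyGetD dr.2 job 0
         let cur := match s.2 with
           | none => dr.1 + t
           | some p => if (j:Int) = 0 then p + t else max dr.1 p + t
         (s.1 ++ [cur], some cur)) (acc, prev)).1
      = acc ++ (List.range rows.length).map (fun k => pvCT pt sol (i0 + k) j) := by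
  intro rows
  induction rows with
  | nil =>
    intro i0 cs acc prev _ hlen _ _
    have : cs = [] := List.eq_nil_of_length_eq_zero (by simpa using hlen)
    subst this
    simp
  | cons r rows ih =>
    intro i0 cs acc prev hrows hlen h hprev
    cases cs with
    | nil => simp at hlen
    | cons c0 cs' =>
      have hr : pt.getD i0 [] = r := by
        have h0 : pt[i0 + 0]? = some r := by
          rw [← List.getElem?_drop, ← hrows]
          simp
        simp only [Nat.add_zero] at h0
        simp [List.getD, h0]
      have ht : PySem.List.pyGetD r job 0 = pvT pt sol i0 j := by
        rw [pvT, hr, hjob]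
      have hc0 : c0 = (if j = 0 then 0 else pvCT pt sol (i0 + 0) (j - 1)) := by
        simpa using h 0 (by simp)
      have hdrop : rows = pt.drop (i0 + 1) := by
        have := congrArg (List.drop 1) hrows
        simpa [List.drop_drop, Nat.add_comm] using this
      have hrest : ∀ k, (hk : k < cs'.length) →
          cs'[k] = (if j = 0 then 0 else pvCT pt sol (i0 + 1 + k) (j - 1)) := by
        intro k hk
        have := h (k + 1) (by simpa using Nat.succ_lt_succ hk)
        simpa [Nat.add_assoc, Nat.add_comm 1 k] using this
      have htail : ∀ hv : List Int,
          hv = acc ++ [pvCT pt sol i0 j] →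
          ((cs'.zip rows).foldl
            (fun (s : List Int × Option Int) dr =>
              let t := PySem.List.pyGetD dr.2 job 0
              let cur := match s.2 with
                | none => dr.1 + t
                | some p => if (j:Int) = 0 then p + t else max dr.1 p + t
              (s.1 ++ [cur], some cur)) (hv, some (pvCT pt sol i0 j))).1
            = acc ++ (List.range (r :: rows).length).map (fun k => pvCT pt sol (i0 + k) j) := by
        intro hv hhv
        subst hhv
        rw [ih (i0 + 1) cs' (acc ++ [pvCT pt sol i0 j]) _ hdrop (by simpa using hlen) hrest rfl]
        rw [List.append_assoc]
        congr 1
        rw [List.length_cons, List.range_succ_eq_map]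
        simp only [List.map_cons, List.map_map, Nat.add_zero, List.singleton_append]
        congr 1
        exact List.map_congr_left (fun k _ => by
          simp only [Function.comp]
          congr 1
          omega)
      simp only [List.zip_cons_cons, List.foldl_cons]
      cases i0 with
      | zero =>
        have hp : prev = none := by simpa using hprev
        subst hp
        have hv : c0 + PySem.List.pyGetD r job 0 = pvCT pt sol 0 j := by
          rw [ht]
          cases j with
          | zero =>
            rw [hc0, if_pos rfl]
            simp [pvCT]
          | succ j' =>
            rw [hc0, if_neg (by omega : ¬ j' + 1 = 0)]
            simp [pvCT]
        show (List.foldl _ (acc ++ [c0 + PySem.List.pyGetD r job 0],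
              some (c0 + PySem.List.pyGetD r job 0)) (cs'.zip rows)).1 = _
        rw [hv]
        exact htail _ rfl
      | succ i' =>
        have hp : prev = some (pvCT pt sol i' j) := by simpa using hprev
        subst hp
        have hv : (if (j:Int) = 0 then pvCT pt sol i' j + PySem.List.pyGetD r job 0
                   else max c0 (pvCT pt sol i' j) + PySem.List.pyGetD r job 0)
            = pvCT pt sol (i' + 1) j := by
          rw [ht]
          cases j with
          | zero =>
            rw [if_pos (by norm_num)]
            simp [pvCT]
          | succ j' =>
            rw [if_neg (by exact_mod_cast (by omega : ¬ ((j' + 1 : Nat) : Int) = 0))]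
            rw [hc0, if_neg (by omega : ¬ j' + 1 = 0)]
            simp only [Nat.add_sub_cancel, Nat.add_zero]
            rw [max_comm]
            conv_rhs => rw [pvCT]
        show (List.foldl _ (acc ++ [if (j:Int) = 0 then pvCT pt sol i' j + PySem.List.pyGetD r job 0
                        else max c0 (pvCT pt sol i' j) + PySem.List.pyGetD r job 0],
              some (if (j:Int) = 0 then pvCT pt sol i' j + PySem.List.pyGetD r job 0
                    else max c0 (pvCT pt sol i' j) + PySem.List.pyGetD r job 0)) (cs'.zip rows)).1 = _
        rw [hv]
        exact htail _ rfl

theorem scan_eq (pt : List (List Int)) (sol : List Int) (j : Nat) (c : List Int)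
    (hc : c = if j = 0 then List.replicate pt.length (0 : Int)
              else (List.range pt.length).map (fun i => pvCT pt sol i (j - 1))) :
    pvBscan pt (sol.getD j 0) (j : Int) c =
      (List.range pt.length).map (fun i => pvCT pt sol i j) := by
  subst hc
  have hlen : (if j = 0 then List.replicate pt.length (0 : Int)
      else (List.range pt.length).map (fun i => pvCT pt sol i (j - 1))).length = pt.length := by
    split <;> simp
  have hget : ∀ k, (hk : k < (if j = 0 then List.replicate pt.length (0 : Int)
      else (List.range pt.length).map (fun i => pvCT pt sol i (j - 1))).length) →
      (if j = 0 then List.replicate pt.length (0 : Int)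
        else (List.range pt.length).map (fun i => pvCT pt sol i (j - 1)))[k]
        = (if j = 0 then 0 else pvCT pt sol (0 + k) (j - 1)) := by
    intro k hk
    by_cases hj : j = 0
    · simp [hj]
    · simp [hj]
  have h := scanAux pt sol j (sol.getD j 0) rfl pt 0 _ [] none (by simp) hlen hget rfl
  rw [pvBscan]
  rw [h]
  simp

theorem combined (sol : List Int) (pt : List (List Int)) (dd : List Int) (hm : 0 < pt.length) :
    ∀ k, k ≤ sol.length →
    (List.range k).foldl
      (fun (st : List Int × Int × Int × Int × Int) (q : Nat) =>
        pvBstep pt dd st ((q:Int), sol.getD q 0))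
      (List.replicate pt.length (0:Int), 0, 0, 0, 0)
    = ((if k = 0 then List.replicate pt.length (0:Int)
        else (List.range pt.length).map (fun i => pvCT pt sol i (k - 1))),
       (List.range k).foldl
         (fun st (q : Nat) => pvAacc dd
           ((List.range pt.length).map
             (fun i => (List.range sol.length).map (fun j => pvCT pt sol i j))) st (q:Int))
         (0, 0, 0, 0)) := by
  intro k
  induction k with
  | zero => intro _; simp
  | succ k ih =>
    intro hk1
    have hk : k ≤ sol.length := by omega
    rw [List.range_succ, List.foldl_append, List.foldl_cons, List.foldl_nil,
      List.foldl_append, List.foldl_cons, List.foldl_nil, ih hk]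
    have hcol := scan_eq pt sol k _ rfl
    have hcomp : PySem.List.pyGetD ((List.range pt.length).map (fun i => pvCT pt sol i k)) (-1) 0
        = pvCT pt sol (pt.length - 1) k := by
      rw [PySem.List.pyGetD_neg_one _ _ (by simp only [ne_eq, List.map_eq_nil_iff, List.range_eq_nil]; omega)]
      rw [List.getLast_eq_getElem]
      simp
    have hlast : PySem.List.pyGetD ((List.range pt.length).map
        (fun i => (List.range sol.length).map (fun j => pvCT pt sol i j))) (-1) []
        = (List.range sol.length).map (fun j => pvCT pt sol (pt.length - 1) j) := by
      rw [PySem.List.pyGetD_neg_one _ _ (by simp only [ne_eq, List.map_eq_nil_iff, List.range_eq_nil]; omega)]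
      rw [List.getLast_eq_getElem]
      simp
    have hcj : PySem.List.pyGetD ((List.range sol.length).map
        (fun j => pvCT pt sol (pt.length - 1) j)) ((k:Int)) 0 = pvCT pt sol (pt.length - 1) k := by
      rw [PySem.List.pyGetD_natCast]
      exact PySem.List.getD_map_range _ _ _ _ (by omega)
    rw [pvBstep]
    simp only [pvAacc]
    rw [hlast, hcj]
    rw [hcol, hcomp]
    rw [if_neg (by omega : ¬ (k + 1) = 0)]
    simp only [Nat.add_sub_cancel]

-- ===== VERDICT (by name: the statement is the Claim_ definition above) =====
theorem calculate_objectives_spec : Claim_equal_calculate_objectives := by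
  unfold Claim_equal_calculate_objectives
  intro sol pt dd _ hpre
  unfold Spec_calculate_objectives
  obtain ⟨hmp, _, _⟩ := hpre
  by_cases hn : sol.length = 0
  · have hsol : sol = [] := List.eq_nil_of_length_eq_zero hn
    subst hsol
    rfl
  · have hm : 0 < pt.length := by
      rcases hmp with h | h
      · exact absurd (by simp [h]) hn
      · simpa [List.length_pos_iff] using h
    have hc := combined sol pt dd hm sol.length (le_refl _)
    have hA : calculate_objectives sol pt dd
        = (List.range sol.length).foldl
            (fun st (q : Nat) => pvAacc dd
              ((List.range pt.length).map
                (fun i => (List.range sol.length).map (fun j => pvCT pt sol i j))) st (q:Int))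
            (0, 0, 0, 0) := by
      rw [calculate_objectives]
      simp only [tableA_eq, pyRange_nat, List.foldl_map]
    have hB : calculate_objectives_alt sol pt dd
        = ((List.range sol.length).foldl
            (fun (st : List Int × Int × Int × Int × Int) (q : Nat) =>
              pvBstep pt dd st ((q:Int), sol.getD q 0))
            (List.replicate pt.length (0:Int), 0, 0, 0, 0)).2 := by
      rw [calculate_objectives_alt]
      rw [PySem.List.enumerate_eq_map_pyRange sol 0]
      simp only [PySem.List.len_eq, pyRange_nat, List.foldl_map, PySem.List.pyGetD_natCast]
    rw [hA, hB, hc]
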